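-- pv_equiv track=rewrite | github.com/Santiago13225/CS-Undergrad-Archive-Santiago | CSC 135/twice.py | twice
-- ===== SOURCE A (Python) =====
-- def twice(list):
--
--     a = []
--     once = set(a)
--
--     b = []
--     twice = set(b)
--
--     c = []
--     more = set(c)
--
--     for num in list:
--         if num in once:
--             once.remove(num)
--             twice.add(num)
--         elif num in twice:
--             twice.remove(num)
--             more.add(num)
--         elif not(num in more):
--             once.add(num)
--
--     return twice
-- ===== SOURCE B (Python) =====
-- def twice(list):
--     # count everything in one pass, then emit the count-2 elements
--     counts = {}
--     for num in list:
--         counts[num] = counts.get(num, 0) + 1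
--     result = set()
--     seen = set()
--     for num in list:
--         if counts[num] == 2:
--             if num in seen:
--                 result.add(num)
--             else:
--                 seen.add(num)
--     return result
-- ===== Notes on version B (the rewrite author's own statement) =====
-- stated objective: simpler
-- what changed: Replaces the once/twice/more three-set migration state machine by count-all-then-filter: one pass builds a frequency dict, a second pass collects exactly the elements whose total count is 2.
import Mathlib
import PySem

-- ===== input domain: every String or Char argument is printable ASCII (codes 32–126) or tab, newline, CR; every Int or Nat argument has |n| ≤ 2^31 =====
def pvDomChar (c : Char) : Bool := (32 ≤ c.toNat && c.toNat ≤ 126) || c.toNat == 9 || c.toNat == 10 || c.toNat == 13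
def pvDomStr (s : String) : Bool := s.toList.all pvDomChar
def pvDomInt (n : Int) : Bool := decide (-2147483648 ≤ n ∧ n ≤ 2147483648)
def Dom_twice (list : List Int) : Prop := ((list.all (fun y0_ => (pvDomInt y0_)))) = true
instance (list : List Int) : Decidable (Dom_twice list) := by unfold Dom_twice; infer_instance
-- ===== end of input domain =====

-- B replaces A's once/twice/more three-set state machine with count-all-then-filter (simpler, same O(n) cost).


-- ===== PORT A =====
-- state (once, twice, more); 'set.remove' appears under a membership guard, so Set.discard is exact there
def twiceStepA (st : PySem.Set Int × PySem.Set Int × PySem.Set Int) (num : Int) :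
    PySem.Set Int × PySem.Set Int × PySem.Set Int :=
  let (once, twi, more) := st
  if PySem.Set.contains once num then
    (PySem.Set.discard once num, PySem.Set.add twi num, more)
  else if PySem.Set.contains twi num then
    (once, PySem.Set.discard twi num, PySem.Set.add more num)
  else if !(PySem.Set.contains more num) then
    (PySem.Set.add once num, twi, more)
  else st

def twice (list : List Int) : List Int :=
  (list.foldl twiceStepA (PySem.Set.empty, PySem.Set.empty, PySem.Set.empty)).2.1

-- ===== PORT B =====
-- state (result, seen); counts[num] is always present in the second loop, so getD 0 is exact
def twiceStepB (counts : PySem.Dict Int Int) (st : PySem.Set Int × PySem.Set Int) (num : Int) :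
    PySem.Set Int × PySem.Set Int :=
  let (result, seen) := st
  if counts.getD num 0 == 2 then
    if PySem.Set.contains seen num then (PySem.Set.add result num, seen)
    else (result, PySem.Set.add seen num)
  else st

def twice_alt (list : List Int) : List Int :=
  let counts := list.foldl (fun d num => d.insert num (d.getD num 0 + 1)) PySem.Dict.empty
  (list.foldl (twiceStepB counts) (PySem.Set.empty, PySem.Set.empty)).1

-- ===== PRECONDITION & SPEC =====
def Spec_twice (list : List Int) (out : List Int) : Prop := out = twice_alt list
instance (list : List Int) (out : List Int) : Decidable (Spec_twice list out) := by unfold Spec_twice; infer_instance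

-- ===== CLAIM (what is proved, stated in full; the proofs are below) =====
def Claim_equal_twice : Prop := ∀ (list : List Int), Dom_twice list → Spec_twice list (twice list)

-- ===== LEMMAS AND PROOFS =====

-- filtering past a discarded element the filter rejects anyway changes nothing
lemma filter_discard (s : List Int) (n : Int) (p : Int → Bool) (hp : p n = false) :
    (PySem.Set.discard s n).filter p = s.filter p := by
  simp only [PySem.Set.discard]
  rw [List.filter_filter]
  apply List.filter_congr
  intro x hx
  by_cases h : x = n
  · subst h; simp [hp]
  · simp [h]

-- Joint loop invariant: h x abstracts the number of occurrences already processed;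
-- c is the full-list count; B's result is always the count-2 filter of A's twice set.
lemma twice_loops_eq (counts : PySem.Dict Int Int) (rest : List Int) :
    ∀ (h : Int → Nat) (once twi more res seen : PySem.Set Int),
    (∀ x, x ∈ once ↔ h x = 1) →
    (∀ x, x ∈ twi ↔ h x = 2) →
    (∀ x, x ∈ more ↔ 3 ≤ h x) →
    (∀ x, x ∈ seen ↔ (counts.getD x 0 = 2 ∧ 1 ≤ h x)) →
    res = twi.filter (fun x => counts.getD x 0 == 2) →
    (∀ x, counts.getD x 0 = (h x : Int) + rest.count x) →
    (rest.foldl twiceStepA (once, twi, more)).2.1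
      = (rest.foldl (twiceStepB counts) (res, seen)).1 := by
  induction rest with
  | nil =>
    intro h once twi more res seen H1 H2 H3 H4 H5 H6
    simp only [List.foldl_nil]
    rw [H5]
    symm
    apply List.filter_eq_self.mpr
    intro x hx
    have h2 := (H2 x).mp hx
    have := H6 x
    simp only [List.count_nil] at this
    simp [this, h2]
  | cons n rest ih =>
    intro h once twi more res seen H1 H2 H3 H4 H5 H6
    simp only [List.foldl_cons]
    have hcn : counts.getD n 0 = (h n : Int) + 1 + rest.count n := by
      have := H6 n; simpa [List.count_cons, add_comm, add_assoc, add_left_comm] using this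
    set h' : Int → Nat := fun x => if x = n then h x + 1 else h x with hh'
    have H6n : ∀ x, counts.getD x 0 = (h' x : Int) + rest.count x := by
      intro x
      by_cases hx : x = n
      · subst hx; simp only [hh', if_pos rfl, hcn]; push_cast; ring
      · have hx' : ¬ (n = x) := fun e => hx e.symm
        have := H6 x
        simpa [hh', hx, List.count_cons, hx'] using this
    by_cases h1 : n ∈ once
    · -- A: once → twice
      have hn1 : h n = 1 := (H1 n).mp h1
      have hnt : n ∉ twi := by simp [H2, hn1]
      have hnr : n ∉ res := by rw [H5]; simp [List.mem_filter]; intro h; exact absurd h hnt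
      have hA : twiceStepA (once, twi, more) n
          = (PySem.Set.discard once n, PySem.Set.add twi n, more) := by
        simp [twiceStepA, PySem.Set.contains_eq_listContains, h1]
      rw [hA]
      have haddt : PySem.Set.add twi n = twi ++ [n] := by
        simp [PySem.Set.add, PySem.Set.contains_eq_listContains, hnt]
      by_cases hc2 : counts.getD n 0 = 2
      · -- B adds n to result
        have hns : n ∈ seen := (H4 n).mpr ⟨hc2, by omega⟩
        have hB : twiceStepB counts (res, seen) n = (PySem.Set.add res n, seen) := by
          simp [twiceStepB, hc2, PySem.Set.contains_eq_listContains, hns]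
        rw [hB]
        apply ih h' _ _ _ _ _ _ _ _ _ _ H6n
        · intro x; by_cases hx : x = n
          · subst hx; simp [PySem.Set.mem_discard, hh', hn1]
          · simp [PySem.Set.mem_discard, hx, H1, hh']
        · intro x; by_cases hx : x = n
          · subst hx; simp [haddt, hh', hn1]
          · simp [haddt, hx, H2, hh']
        · intro x; by_cases hx : x = n
          · subst hx; simp [H3, hh', hn1]
          · simp [H3, hx, hh']
        · intro x; by_cases hx : x = n
          · subst hx; simp [hns, hc2, hh']
          · simp [H4, hx, hh']
        · have haddr : PySem.Set.add res n = res ++ [n] := by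
            simp [PySem.Set.add, PySem.Set.contains_eq_listContains, hnr]
          rw [haddr, haddt, H5, List.filter_append]
          simp [hc2]
      · -- count ≠ 2: B no-op, the new twice element is filtered out
        have hns : n ∉ seen := by simp [H4, hc2]
        have hB : twiceStepB counts (res, seen) n = (res, seen) := by
          simp [twiceStepB, hc2]
        rw [hB]
        apply ih h' _ _ _ _ _ _ _ _ _ _ H6n
        · intro x; by_cases hx : x = n
          · subst hx; simp [PySem.Set.mem_discard, hh', hn1]
          · simp [PySem.Set.mem_discard, hx, H1, hh']
        · intro x; by_cases hx : x = n
          · subst hx; simp [haddt, hh', hn1]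
          · simp [haddt, hx, H2, hh']
        · intro x; by_cases hx : x = n
          · subst hx; simp [H3, hh', hn1]
          · simp [H3, hx, hh']
        · intro x; by_cases hx : x = n
          · subst hx; simp [hns, hc2, hh']
          · simp [H4, hx, hh']
        · rw [haddt, H5, List.filter_append]
          simp [hc2]
    · by_cases h2 : n ∈ twi
      · -- A: twice → more
        have hn2 : h n = 2 := (H2 n).mp h2
        have hc2 : counts.getD n 0 ≠ 2 := by
          rw [hcn, hn2]; have : (0:Int) ≤ rest.count n := Int.natCast_nonneg _; omega
        have hnm : n ∉ more := by simp [H3, hn2]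
        have hA : twiceStepA (once, twi, more) n
            = (once, PySem.Set.discard twi n, PySem.Set.add more n) := by
          simp [twiceStepA, PySem.Set.contains_eq_listContains, h1, h2]
        have hB : twiceStepB counts (res, seen) n = (res, seen) := by
          simp [twiceStepB, hc2]
        rw [hA, hB]
        apply ih h' _ _ _ _ _ _ _ _ _ _ H6n
        · intro x; by_cases hx : x = n
          · subst hx; simp [H1, hn2, hh']  -- n ∉ once, h' n = 3
          · simp [H1, hx, hh']
        · intro x; by_cases hx : x = n
          · subst hx; simp [PySem.Set.mem_discard, hh', hn2]
          · simp [PySem.Set.mem_discard, hx, H2, hh']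
        · intro x; by_cases hx : x = n
          · subst hx; simp [PySem.Set.mem_add, hh', hn2]
          · simp [PySem.Set.mem_add, hx, H3, hh']
        · intro x; by_cases hx : x = n
          · subst hx; simp [H4, hc2, hh']
          · simp [H4, hx, hh']
        · rw [H5, filter_discard _ _ _ (by simp [hc2])]
      · by_cases h3 : n ∈ more
        · -- A no-op
          have hn3 : 3 ≤ h n := (H3 n).mp h3
          have hc2 : counts.getD n 0 ≠ 2 := by
            rw [hcn]; have : (0:Int) ≤ rest.count n := Int.natCast_nonneg _; omega
          have hA : twiceStepA (once, twi, more) n = (once, twi, more) := by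
            simp [twiceStepA, PySem.Set.contains_eq_listContains, h1, h2, h3]
          have hB : twiceStepB counts (res, seen) n = (res, seen) := by
            simp [twiceStepB, hc2]
          rw [hA, hB]
          apply ih h' _ _ _ _ _ _ _ _ _ H5 H6n
          · intro x; by_cases hx : x = n
            · subst hx; simp [H1, hh']; omega
            · simp [H1, hx, hh']
          · intro x; by_cases hx : x = n
            · subst hx; simp [H2, hh']; omega
            · simp [H2, hx, hh']
          · intro x; by_cases hx : x = n
            · subst hx; simp [H3, hh']; omega
            · simp [H3, hx, hh']
          · intro x; by_cases hx : x = n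
            · subst hx; simp [H4, hc2, hh']
            · simp [H4, hx, hh']
        · -- fresh element: A adds to once
          have hn0 : h n = 0 := by
            have o : h n ≠ 1 := fun e => h1 ((H1 n).mpr e)
            have t : h n ≠ 2 := fun e => h2 ((H2 n).mpr e)
            have m : ¬ 3 ≤ h n := fun e => h3 ((H3 n).mpr e)
            omega
          have hA : twiceStepA (once, twi, more) n = (PySem.Set.add once n, twi, more) := by
            simp [twiceStepA, PySem.Set.contains_eq_listContains, h1, h2, h3]
          rw [hA]
          by_cases hc2 : counts.getD n 0 = 2
          · have hns : n ∉ seen := by simp [H4, hn0]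
            have hB : twiceStepB counts (res, seen) n = (res, PySem.Set.add seen n) := by
              simp [twiceStepB, hc2, PySem.Set.contains_eq_listContains, hns]
            rw [hB]
            apply ih h' _ _ _ _ _ _ _ _ _ H5 H6n
            · intro x; by_cases hx : x = n
              · subst hx; simp [PySem.Set.mem_add, hh', hn0]
              · simp [PySem.Set.mem_add, hx, H1, hh']
            · intro x; by_cases hx : x = n
              · subst hx; simp [H2, hh', hn0]
              · simp [H2, hx, hh']
            · intro x; by_cases hx : x = n
              · subst hx; simp [H3, hh', hn0]
              · simp [H3, hx, hh']
            · intro x; by_cases hx : x = n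
              · subst hx; simp [PySem.Set.mem_add, hc2, hh']
              · simp [PySem.Set.mem_add, hx, H4, hh']
          · have hns : n ∉ seen := by simp [H4, hc2]
            have hB : twiceStepB counts (res, seen) n = (res, seen) := by
              simp [twiceStepB, hc2]
            rw [hB]
            apply ih h' _ _ _ _ _ _ _ _ _ H5 H6n
            · intro x; by_cases hx : x = n
              · subst hx; simp [PySem.Set.mem_add, hh', hn0]
              · simp [PySem.Set.mem_add, hx, H1, hh']
            · intro x; by_cases hx : x = n
              · subst hx; simp [H2, hh', hn0]
              · simp [H2, hx, hh']
            · intro x; by_cases hx : x = n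
              · subst hx; simp [H3, hh', hn0]
              · simp [H3, hx, hh']
            · intro x; by_cases hx : x = n
              · subst hx; simp [hns, hc2, hh']
              · simp [H4, hx, hh']

-- ===== VERDICT (by name: the statement is the Claim_ definition above) =====
theorem twice_spec : Claim_equal_twice := by
  intro list _
  show twice list = twice_alt list
  unfold twice twice_alt
  exact twice_loops_eq _ list (fun _ => 0)
    PySem.Set.empty PySem.Set.empty PySem.Set.empty PySem.Set.empty PySem.Set.empty
    (fun x => by simp [PySem.Set.empty])
    (fun x => by simp [PySem.Set.empty])
    (fun x => by simp [PySem.Set.empty])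
    (fun x => by simp [PySem.Set.empty, pysem])
    (by simp [PySem.Set.empty])
    (fun x => by rw [PySem.Dict.getD_foldl_insert_add_one]; simp [pysem])
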